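-- pv_equiv track=rewrite | github.com/ak506080/typing_speed_test | typing_speed_test.py | calculate_error_details
-- ===== SOURCE A (Python) =====
-- def calculate_error_details(user_input, sample_text):
--     errors = []
--     min_length = min(len(user_input), len(sample_text))
--
--     for index in range(min_length):
--         if user_input[index] != sample_text[index]:
--             errors.append((index, sample_text[index], user_input[index]))
--
--     if len(user_input) < len(sample_text):
--         for index in range(len(user_input), len(sample_text)):
--             errors.append((index, sample_text[index], ''))
--
--     if len(user_input) > len(sample_text):
--         for index in range(len(sample_text), len(user_input)):
--             errors.append((index, '', user_input[index]))
--
--     return errors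
-- ===== SOURCE B (Python) =====
-- def calculate_error_details(user_input, sample_text):
--     n = max(len(user_input), len(sample_text))
--     return [(i, sample_text[i:i+1], user_input[i:i+1])
--             for i in range(n)
--             if user_input[i:i+1] != sample_text[i:i+1]]
-- ===== Notes on version B (the rewrite author's own statement) =====
-- stated objective: simpler
-- what changed: Replaced A's three separate loops (mismatch prefix, missing tail, extra tail) by one uniform comprehension over range(max(len(user_input), len(sample_text))) comparing the one-character slices s[i:i+1], whose empty value past the end subsumes both tail cases.
import Mathlib
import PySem

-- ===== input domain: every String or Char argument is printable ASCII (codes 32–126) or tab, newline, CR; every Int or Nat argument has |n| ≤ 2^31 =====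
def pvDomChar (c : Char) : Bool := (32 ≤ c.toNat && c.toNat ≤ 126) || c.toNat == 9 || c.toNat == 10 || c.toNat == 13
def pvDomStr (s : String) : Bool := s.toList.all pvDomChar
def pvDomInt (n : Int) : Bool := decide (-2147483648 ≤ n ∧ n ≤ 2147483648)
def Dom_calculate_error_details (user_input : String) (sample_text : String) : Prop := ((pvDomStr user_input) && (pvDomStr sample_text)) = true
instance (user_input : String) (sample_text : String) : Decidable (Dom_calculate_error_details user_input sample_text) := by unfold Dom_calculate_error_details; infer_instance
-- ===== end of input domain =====

-- B replaces A's three loops by one uniform single pass over range(max(len u, len s))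
-- comparing one-character slices (simpler decomposition; same return value everywhere).

-- ===== PORT A =====
-- Python chars fetched with x[i] are 1-char strings; in range(min_length) the index is
-- always in range, so pyGetD (default never used) is exact; the != on 1-char strings is
-- ported as Char disequality (equal iff the chars are equal).
def calculate_error_details (user_input : String) (sample_text : String) : List (Int × String × String) :=
  let u := user_input.toList
  let s := sample_text.toList
  let min_length : Nat := min u.length s.length
  let errors : List (Int × String × String) :=
    (PySem.List.pyRange 0 (min_length : Int)).foldl
      (fun errors index =>
        if PySem.List.pyGetD u index ' ' != PySem.List.pyGetD s index ' ' then
          errors ++ [(index, String.ofList [PySem.List.pyGetD s index ' '],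
                             String.ofList [PySem.List.pyGetD u index ' '])]
        else errors) []
  let errors :=
    if u.length < s.length then
      (PySem.List.pyRange (u.length : Int) (s.length : Int)).foldl
        (fun errors index =>
          errors ++ [(index, String.ofList [PySem.List.pyGetD s index ' '], "")]) errors
    else errors
  let errors :=
    if s.length < u.length then
      (PySem.List.pyRange (s.length : Int) (u.length : Int)).foldl
        (fun errors index =>
          errors ++ [(index, "", String.ofList [PySem.List.pyGetD u index ' '])]) errors
    else errors
  errors

-- ===== PORT B =====
-- Source B's comprehension: filter by slice disequality, then build the tuples (slices are
-- PySem.List.slice on .toList; Python str equality of the slices = list equality).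
def calculate_error_details_alt (user_input : String) (sample_text : String) : List (Int × String × String) :=
  let u := user_input.toList
  let s := sample_text.toList
  let n : Nat := max u.length s.length
  ((PySem.List.pyRange 0 (n : Int)).filter
      (fun i => PySem.List.slice u (some i) (some (i + 1)) != PySem.List.slice s (some i) (some (i + 1)))).map
    (fun i => (i, String.ofList (PySem.List.slice s (some i) (some (i + 1))),
                  String.ofList (PySem.List.slice u (some i) (some (i + 1)))))

-- ===== PRECONDITION & SPEC =====
def Spec_calculate_error_details (user_input : String) (sample_text : String) (out : List (Int × String × String)) : Prop := out = calculate_error_details_alt user_input sample_text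
instance (user_input : String) (sample_text : String) (out : List (Int × String × String)) : Decidable (Spec_calculate_error_details user_input sample_text out) := by unfold Spec_calculate_error_details; infer_instance

-- ===== CLAIM (what is proved, stated in full; the proofs are below) =====
def Claim_equal_calculate_error_details : Prop := ∀ (user_input : String) (sample_text : String), Dom_calculate_error_details user_input sample_text → Spec_calculate_error_details user_input sample_text (calculate_error_details user_input sample_text)

-- ===== LEMMAS AND PROOFS =====

-- one-character slice inside the list: xs[i:i+1] = [xs[i]]
theorem slice_one_of_lt {α : Type} (xs : List α) {i : Int} (h0 : 0 ≤ i) (h1 : i.toNat < xs.length) :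
    PySem.List.slice xs (some i) (some (i + 1)) = [xs[i.toNat]] := by
  rw [PySem.List.slice_toNat xs h0 (by omega)]
  have h2 : (i + 1).toNat - i.toNat = 1 := by omega
  rw [h2, List.drop_eq_getElem_cons h1]
  rfl

-- one-character slice past the end: xs[i:i+1] = []
theorem slice_one_of_ge {α : Type} (xs : List α) {i : Int} (h0 : 0 ≤ i) (h1 : xs.length ≤ i.toNat) :
    PySem.List.slice xs (some i) (some (i + 1)) = [] := by
  rw [PySem.List.slice_toNat xs h0 (by omega)]
  simp [List.drop_eq_nil_iff.mpr (by omega)]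

-- ===== VERDICT (by name: the statement is the Claim_ definition above) =====
theorem seg_common (u s : List Char) (m : Nat) (hmu : m ≤ u.length) (hms : m ≤ s.length) :
    List.map (fun index : Int => (index, String.ofList [PySem.List.pyGetD s index ' '], String.ofList [PySem.List.pyGetD u index ' ']))
      (List.filter (fun index : Int => PySem.List.pyGetD u index ' ' != PySem.List.pyGetD s index ' ')
        (PySem.List.pyRange 0 (m : Int))) =
    List.map (fun i : Int => (i, String.ofList (PySem.List.slice s (some i) (some (i + 1))), String.ofList (PySem.List.slice u (some i) (some (i + 1)))))
      (List.filter (fun i : Int => PySem.List.slice u (some i) (some (i + 1)) != PySem.List.slice s (some i) (some (i + 1)))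
        (PySem.List.pyRange 0 (m : Int))) := by
  have hb : ∀ i : Int, i ∈ PySem.List.pyRange 0 (m : Int) → 0 ≤ i ∧ i.toNat < m := by
    intro i hi
    rcases PySem.List.mem_pyRange_one.mp hi with ⟨h0, h1⟩
    exact ⟨h0, by omega⟩
  have hpq : ∀ i ∈ PySem.List.pyRange 0 (m : Int),
      (PySem.List.pyGetD u i ' ' != PySem.List.pyGetD s i ' ') =
      (PySem.List.slice u (some i) (some (i + 1)) != PySem.List.slice s (some i) (some (i + 1))) := by
    intro i hi
    rcases hb i hi with ⟨h0, h1⟩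
    rw [slice_one_of_lt u h0 (by omega), slice_one_of_lt s h0 (by omega),
        PySem.List.pyGetD_eq_getElem u ' ' h0 (by omega), PySem.List.pyGetD_eq_getElem s ' ' h0 (by omega)]
    simp [bne]
  rw [List.filter_congr hpq]
  apply List.map_congr_left
  intro i hi
  rcases hb i (List.mem_of_mem_filter hi) with ⟨h0, h1⟩
  rw [slice_one_of_lt u h0 (by omega), slice_one_of_lt s h0 (by omega),
      PySem.List.pyGetD_eq_getElem u ' ' h0 (by omega), PySem.List.pyGetD_eq_getElem s ' ' h0 (by omega)]

theorem seg_tail_u (u s : List Char) (a b : Nat) (hau : u.length ≤ a) (hbs : b ≤ s.length) :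
    List.map (fun index : Int => (index, String.ofList [PySem.List.pyGetD s index ' '], ""))
      (PySem.List.pyRange (a : Int) (b : Int)) =
    List.map (fun i : Int => (i, String.ofList (PySem.List.slice s (some i) (some (i + 1))), String.ofList (PySem.List.slice u (some i) (some (i + 1)))))
      (List.filter (fun i : Int => PySem.List.slice u (some i) (some (i + 1)) != PySem.List.slice s (some i) (some (i + 1)))
        (PySem.List.pyRange (a : Int) (b : Int))) := by
  have hb : ∀ i : Int, i ∈ PySem.List.pyRange (a : Int) (b : Int) → 0 ≤ i ∧ u.length ≤ i.toNat ∧ i.toNat < s.length := by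
    intro i hi
    rcases PySem.List.mem_pyRange_one.mp hi with ⟨h0, h1⟩
    exact ⟨by omega, by omega, by omega⟩
  have hall : ∀ i ∈ PySem.List.pyRange (a : Int) (b : Int),
      (PySem.List.slice u (some i) (some (i + 1)) != PySem.List.slice s (some i) (some (i + 1))) = true := by
    intro i hi
    rcases hb i hi with ⟨h0, h1, h2⟩
    rw [slice_one_of_ge u h0 h1, slice_one_of_lt s h0 h2]
    simp
  rw [List.filter_eq_self.mpr hall]
  apply List.map_congr_left
  intro i hi
  rcases hb i hi with ⟨h0, h1, h2⟩
  rw [slice_one_of_ge u h0 h1, slice_one_of_lt s h0 h2,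
      PySem.List.pyGetD_eq_getElem s ' ' h0 (by omega)]

theorem seg_tail_s (u s : List Char) (a b : Nat) (has : s.length ≤ a) (hbu : b ≤ u.length) :
    List.map (fun index : Int => (index, "", String.ofList [PySem.List.pyGetD u index ' ']))
      (PySem.List.pyRange (a : Int) (b : Int)) =
    List.map (fun i : Int => (i, String.ofList (PySem.List.slice s (some i) (some (i + 1))), String.ofList (PySem.List.slice u (some i) (some (i + 1)))))
      (List.filter (fun i : Int => PySem.List.slice u (some i) (some (i + 1)) != PySem.List.slice s (some i) (some (i + 1)))
        (PySem.List.pyRange (a : Int) (b : Int))) := by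
  have hb : ∀ i : Int, i ∈ PySem.List.pyRange (a : Int) (b : Int) → 0 ≤ i ∧ s.length ≤ i.toNat ∧ i.toNat < u.length := by
    intro i hi
    rcases PySem.List.mem_pyRange_one.mp hi with ⟨h0, h1⟩
    exact ⟨by omega, by omega, by omega⟩
  have hall : ∀ i ∈ PySem.List.pyRange (a : Int) (b : Int),
      (PySem.List.slice u (some i) (some (i + 1)) != PySem.List.slice s (some i) (some (i + 1))) = true := by
    intro i hi
    rcases hb i hi with ⟨h0, h1, h2⟩
    rw [slice_one_of_ge s h0 h1, slice_one_of_lt u h0 h2]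
    simp
  rw [List.filter_eq_self.mpr hall]
  apply List.map_congr_left
  intro i hi
  rcases hb i hi with ⟨h0, h1, h2⟩
  rw [slice_one_of_ge s h0 h1, slice_one_of_lt u h0 h2,
      PySem.List.pyGetD_eq_getElem u ' ' h0 (by omega)]

theorem main_eq (user_input sample_text : String) :
    calculate_error_details user_input sample_text = calculate_error_details_alt user_input sample_text := by
  unfold calculate_error_details calculate_error_details_alt
  dsimp only
  set u := user_input.toList with hu
  set s := sample_text.toList with hs
  rw [PySem.List.foldl_append_if, List.nil_append]
  rcases Nat.lt_trichotomy u.length s.length with h | h | h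
  · rw [if_neg (by omega), if_pos h, PySem.List.foldl_append_singleton_eq_map]
    have hmin : min u.length s.length = u.length := by omega
    have hmax : max u.length s.length = s.length := by omega
    rw [hmin, hmax,
        PySem.List.pyRange_one_append 0 (u.length : Int) (s.length : Int) (by omega) (by omega),
        List.filter_append, List.map_append,
        seg_common u s u.length le_rfl (by omega), seg_tail_u u s u.length s.length le_rfl (by omega)]
  · rw [if_neg (by omega), if_neg (by omega)]
    have hmin : min u.length s.length = u.length := by omega
    have hmax : max u.length s.length = u.length := by omega
    rw [hmin, hmax, seg_common u s u.length le_rfl (by omega)]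
  · rw [if_pos h, if_neg (by omega), PySem.List.foldl_append_singleton_eq_map]
    have hmin : min u.length s.length = s.length := by omega
    have hmax : max u.length s.length = u.length := by omega
    rw [hmin, hmax,
        PySem.List.pyRange_one_append 0 (s.length : Int) (u.length : Int) (by omega) (by omega),
        List.filter_append, List.map_append,
        seg_common u s s.length (by omega) le_rfl, seg_tail_s u s s.length u.length le_rfl (by omega)]

theorem calculate_error_details_spec : Claim_equal_calculate_error_details := by
  intro user_input sample_text _
  exact main_eq user_input sample_text
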